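-- pv_equiv track=rewrite | github.com/Gahroot/amg-portal | backend/app/services/document_diff_service.py | _group_into_hunks
-- ===== SOURCE A (Python) =====
-- CONTEXT_LINES = 3
--
-- def _group_into_hunks(
--     opcodes: list[tuple[str, int, int, int, int]],
-- ) -> list[list[tuple[str, int, int, int, int]]]:
--     """Group opcodes into hunk slices (changed blocks + surrounding context)."""
--     changed = {i for i, (tag, *_) in enumerate(opcodes) if tag != "equal"}
--     if not changed:
--         return []
--     n = len(opcodes)
--     groups: list[list[tuple[str, int, int, int, int]]] = []
--     i = 0
--     while i < n:
--         if i not in changed: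
--             i += 1
--             continue
--         start = i - 1 if i > 0 and opcodes[i - 1][0] == "equal" else i
--         end = i + 1
--         while end < n:
--             if end in changed:
--                 end += 1
--                 continue
--             _tag, ae1, ae2, *_ = opcodes[end]
--             eq_len = ae2 - ae1
--             next_changed = end + 1 < n and (end + 1) in changed
--             if _tag == "equal" and next_changed and eq_len <= CONTEXT_LINES * 2:
--                 end += 1
--                 continue
--             end += 1
--             break
--         groups.append(list(opcodes[start:end]))
--         i = end
--     return groups
-- ===== SOURCE B (Python) =====
-- CONTEXT_LINES = 3
--
-- def _group_into_hunks(
--     opcodes: list[tuple[str, int, int, int, int]],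
-- ) -> list[list[tuple[str, int, int, int, int]]]:
--     """Runs-based reformulation: collapse changed indices into maximal runs,
--     merge runs bridged by a single short 'equal' opcode, then slice each
--     merged run with one opcode of context on each side."""
--     changed = [i for i, (tag, *_) in enumerate(opcodes) if tag != "equal"]
--     if not changed:
--         return []
--     # maximal runs of consecutive changed indices
--     runs: list[tuple[int, int]] = []
--     rs = re = changed[0]
--     for i in changed[1:]:
--         if i == re + 1:
--             re = i
--         else:
--             runs.append((rs, re))
--             rs = re = i
--     runs.append((rs, re))
--     # merge adjacent runs separated by exactly one equal opcode of a-length <= 2*CONTEXT_LINES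
--     merged = [runs[0]]
--     for rs, re in runs[1:]:
--         ps, pe = merged[-1]
--         if rs == pe + 2 and opcodes[pe + 1][2] - opcodes[pe + 1][1] <= CONTEXT_LINES * 2:
--             merged[-1] = (ps, re)
--         else:
--             merged.append((rs, re))
--     n = len(opcodes)
--     return [opcodes[max(s - 1, 0):min(e + 2, n)] for s, e in merged]
-- ===== Notes on version B (the rewrite author's own statement) =====
-- stated objective: alternative
-- what changed: Replaces the index-set plus nested while-loop scan (outer cursor, inner bridging scan) by a three-stage pipeline: collect the changed indices, collapse them into maximal consecutive runs, merge runs separated by a single short equal opcode, then emit one context-padded slice per merged run.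
import Mathlib
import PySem

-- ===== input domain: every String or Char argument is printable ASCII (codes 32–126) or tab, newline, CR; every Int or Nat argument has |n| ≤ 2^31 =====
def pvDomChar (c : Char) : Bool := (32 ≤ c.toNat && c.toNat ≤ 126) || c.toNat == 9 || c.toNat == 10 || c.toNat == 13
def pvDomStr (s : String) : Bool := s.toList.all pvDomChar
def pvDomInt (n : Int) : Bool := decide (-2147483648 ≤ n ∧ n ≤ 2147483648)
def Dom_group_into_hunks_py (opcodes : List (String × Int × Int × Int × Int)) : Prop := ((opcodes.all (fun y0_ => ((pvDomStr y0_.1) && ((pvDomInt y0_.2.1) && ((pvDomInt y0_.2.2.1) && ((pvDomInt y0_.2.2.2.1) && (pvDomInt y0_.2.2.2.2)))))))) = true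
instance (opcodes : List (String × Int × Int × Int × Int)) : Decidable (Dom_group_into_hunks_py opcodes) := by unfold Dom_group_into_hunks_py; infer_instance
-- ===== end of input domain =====

-- B replaces A's index-set scan with nested while-loops by a runs-collapse/merge/slice pipeline (same result, same cost; objective: alternative decomposition).

abbrev PvOp := String × Int × Int × Int × Int

-- ===== PORT A =====

def pvCONTEXT_LINES : Int := 3

def pvD : PvOp := ("", 0, 0, 0, 0)

-- the comprehension over enumerate(opcodes) selecting indices with tag != "equal"
-- (indices are the nonnegative ints 0,1,2,…; ported as Nat — exact here)
def pvChangedIdxs : List PvOp → Nat → List Nat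
  | [], _ => []
  | o :: rest, s =>
    if o.1 ≠ "equal" then s :: pvChangedIdxs rest (s + 1) else pvChangedIdxs rest (s + 1)

-- inner `while end < n` loop of A; returns the final value of `end`
def pvAInner (ops : List PvOp) (ch : List Nat) (e : Nat) : Nat :=
  if h : e < ops.length then
    if ch.contains e then pvAInner ops ch (e + 1)
    else
      let o := PySem.List.pyGetD ops (e : Int) pvD
      if o.1 = "equal" ∧ (e + 1 < ops.length ∧ ch.contains (e + 1) = true) ∧
          o.2.2.1 - o.2.1 ≤ pvCONTEXT_LINES * 2 then
        pvAInner ops ch (e + 1)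
      else e + 1
  else e
termination_by ops.length - e
decreasing_by all_goals omega

-- needed for pvAOuter's termination
theorem pvAInner_ge (ops : List PvOp) (ch : List Nat) (e : Nat) : e ≤ pvAInner ops ch e := by
  rw [pvAInner]
  split
  · dsimp only
    split
    · have := pvAInner_ge ops ch (e + 1); omega
    · split
      · have := pvAInner_ge ops ch (e + 1); omega
      · omega
  · omega
termination_by ops.length - e
decreasing_by all_goals omega

-- outer `while i < n` loop of A
def pvAOuter (ops : List PvOp) (ch : List Nat) (i : Nat) : List (List PvOp) :=
  if h : i < ops.length then
    if ch.contains i = false then pvAOuter ops ch (i + 1)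
    else
      let start := if 0 < i ∧ (PySem.List.pyGetD ops ((i : Int) - 1) pvD).1 = "equal" then i - 1 else i
      let e := pvAInner ops ch (i + 1)
      PySem.List.slice ops (some (start : Int)) (some (e : Int)) :: pvAOuter ops ch e
  else []
termination_by ops.length - i
decreasing_by
  · omega
  · have := pvAInner_ge ops ch (i + 1); omega

def group_into_hunks_py (opcodes : List (String × Int × Int × Int × Int)) : List (List (String × Int × Int × Int × Int)) :=
  let changed : PySem.Set Nat := PySem.Set.ofList (pvChangedIdxs opcodes 0)
  if changed.isEmpty then [] else pvAOuter opcodes changed 0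

-- ===== PORT B =====

-- opcodes[k][2] - opcodes[k][1]  (the a-side length of an equal opcode)
def pvEqLenAt (ops : List PvOp) (k : Nat) : Int :=
  (PySem.List.pyGetD ops (k : Int) pvD).2.2.1 - (PySem.List.pyGetD ops (k : Int) pvD).2.1

-- body of B's `for i in changed[1:]` loop; state = (runs, rs, re)
def pvRunsStep (st : List (Nat × Nat) × Nat × Nat) (i : Nat) : List (Nat × Nat) × Nat × Nat :=
  if i = st.2.2 + 1 then (st.1, st.2.1, i) else (st.1 ++ [(st.2.1, st.2.2)], i, i)

-- body of B's `for rs, re in runs[1:]` loop; `merged` is kept REVERSED (head = merged[-1])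
def pvMergeStep (ops : List PvOp) (acc : List (Nat × Nat)) (r : Nat × Nat) : List (Nat × Nat) :=
  match acc with
  | [] => [r]
  | p :: tl =>
    if r.1 = p.2 + 2 ∧ pvEqLenAt ops (p.2 + 1) ≤ pvCONTEXT_LINES * 2 then (p.1, r.2) :: tl
    else r :: p :: tl

def group_into_hunks_py_alt (opcodes : List (String × Int × Int × Int × Int)) : List (List (String × Int × Int × Int × Int)) :=
  match pvChangedIdxs opcodes 0 with
  | [] => []
  | c0 :: cs =>
    let st := cs.foldl pvRunsStep ([], c0, c0)
    match st.1 ++ [(st.2.1, st.2.2)] with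
    | [] => []   -- unreachable: the scrutinee ends with an appended element
    | r0 :: rest =>
      ((rest.foldl (pvMergeStep opcodes) [r0]).reverse).map
        (fun r => PySem.List.slice opcodes (some (max ((r.1 : Int) - 1) 0))
          (some (min ((r.2 : Int) + 2) (PySem.List.len opcodes))))

-- ===== PRECONDITION & SPEC =====
def Spec_group_into_hunks_py (opcodes : List (String × Int × Int × Int × Int)) (out : List (List (String × Int × Int × Int × Int))) : Prop := out = group_into_hunks_py_alt opcodes
instance (opcodes : List (String × Int × Int × Int × Int)) (out : List (List (String × Int × Int × Int × Int))) : Decidable (Spec_group_into_hunks_py opcodes out) := by unfold Spec_group_into_hunks_py; infer_instance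

-- ===== CLAIM (what is proved, stated in full; the proofs are below) =====
def Claim_equal_group_into_hunks_py : Prop := ∀ (opcodes : List (String × Int × Int × Int × Int)), Dom_group_into_hunks_py opcodes → Spec_group_into_hunks_py opcodes (group_into_hunks_py opcodes)

-- ===== LEMMAS AND PROOFS =====

-- `pvChg ops j` ⟺ index j holds a non-"equal" opcode (the membership test `j in changed`)
def pvChg (ops : List PvOp) (j : Nat) : Bool :=
  match ops[j]? with
  | some o => decide (o.1 ≠ "equal")
  | none => false

-- recursive form of B's runs-collapsing loop
def pvRunsAux : List Nat → Nat → Nat → List (Nat × Nat)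
  | [], rs, re => [(rs, re)]
  | i :: cs, rs, re => if i = re + 1 then pvRunsAux cs rs i else (rs, re) :: pvRunsAux cs i i

-- recursive form of B's merging loop
def pvMergeAux (ops : List PvOp) : List (Nat × Nat) → Nat → Nat → List (Nat × Nat)
  | [], ps, pe => [(ps, pe)]
  | r :: rest, ps, pe =>
    if r.1 = pe + 2 ∧ pvEqLenAt ops (pe + 1) ≤ pvCONTEXT_LINES * 2 then pvMergeAux ops rest ps r.2
    else (ps, pe) :: pvMergeAux ops rest r.1 r.2

def pvSliceOf (ops : List PvOp) (r : Nat × Nat) : List PvOp :=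
  PySem.List.slice ops (some (max ((r.1 : Int) - 1) 0)) (some (min ((r.2 : Int) + 2) (PySem.List.len ops)))

def pvGroupsOf (ops : List PvOp) : List (Nat × Nat) → List (List PvOp)
  | [] => []
  | r :: rest => (pvMergeAux ops rest r.1 r.2).map (pvSliceOf ops)

-- `pvRunsOK ops R lo`: R lists the maximal runs of changed indices ≥ lo, in order
def pvRunsOK (ops : List PvOp) : List (Nat × Nat) → Nat → Prop
  | [], lo => ∀ j, lo ≤ j → pvChg ops j = false
  | (s, e) :: rest, lo =>
      lo ≤ s ∧ s ≤ e ∧ (∀ j, lo ≤ j → j < s → pvChg ops j = false) ∧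
      (∀ j, s ≤ j → j ≤ e → pvChg ops j = true) ∧ pvChg ops (e + 1) = false ∧
      pvRunsOK ops rest (e + 2)

theorem pvChg_lt (ops : List PvOp) (j : Nat) (h : pvChg ops j = true) : j < ops.length := by
  unfold pvChg at h
  by_contra hn
  rw [List.getElem?_eq_none (by omega)] at h
  simp at h

theorem pvChg_tag (ops : List PvOp) (j : Nat) (hj : j < ops.length) (h : pvChg ops j = false) :
    ops[j].1 = "equal" := by
  unfold pvChg at h
  rw [List.getElem?_eq_getElem hj] at h
  simpa using h

theorem mem_pvChangedIdxs (ops : List PvOp) : ∀ (s k : Nat),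
    k ∈ pvChangedIdxs ops s ↔ s ≤ k ∧ pvChg ops (k - s) = true := by
  induction ops with
  | nil => intro s k; simp [pvChangedIdxs, pvChg]
  | cons o rest ih =>
    intro s k
    by_cases hk : k = s
    · subst hk
      simp only [pvChangedIdxs]
      by_cases h : o.1 = "equal" <;> simp [h, ih, pvChg]
    · constructor
      · intro hmem
        simp only [pvChangedIdxs] at hmem
        have hmem' : k ∈ pvChangedIdxs rest (s + 1) := by
          split at hmem <;> simp_all
        have := (ih (s + 1) k).mp hmem'
        refine ⟨by omega, ?_⟩
        have hks : k - s = (k - (s + 1)) + 1 := by omega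
        rw [hks]
        simpa [pvChg] using this.2
      · intro ⟨hsk, hchg⟩
        have hsk' : s + 1 ≤ k := by omega
        have hks : k - s = (k - (s + 1)) + 1 := by omega
        rw [hks] at hchg
        have : k ∈ pvChangedIdxs rest (s + 1) := (ih (s + 1) k).mpr ⟨hsk', by simpa [pvChg] using hchg⟩
        simp only [pvChangedIdxs]
        split <;> simp [this]

theorem pairwise_pvChangedIdxs (ops : List PvOp) : ∀ s, (pvChangedIdxs ops s).Pairwise (· < ·) := by
  induction ops with
  | nil => intro s; simp [pvChangedIdxs]
  | cons o rest ih =>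
    intro s
    have hge : ∀ k ∈ pvChangedIdxs rest (s + 1), s < k := by
      intro k hk
      have := (mem_pvChangedIdxs rest (s + 1) k).mp hk
      omega
    simp only [pvChangedIdxs]
    split
    · exact List.Pairwise.cons hge (ih (s + 1))
    · exact ih (s + 1)

theorem pvAInner_jump (ops : List PvOp) (ch : List Nat)
    (hch : ∀ k, ch.contains k = pvChg ops k) (q e : Nat) (he : e ≤ q)
    (hrun : ∀ j, e ≤ j → j < q → pvChg ops j = true) :
    pvAInner ops ch e = pvAInner ops ch q := by
  by_cases heq : e = q
  · rw [heq]
  · have hce : pvChg ops e = true := hrun e le_rfl (by omega)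
    have hlt := pvChg_lt ops e hce
    have hcont : ch.contains e = true := by rw [hch]; exact hce
    rw [pvAInner, dif_pos hlt, if_pos hcont]
    exact pvAInner_jump ops ch hch q (e + 1) (by omega) (fun j h1 h2 => hrun j (by omega) h2)
termination_by q - e
decreasing_by omega

theorem pvAOuter_nil (ops : List PvOp) (ch : List Nat) (p : Nat) (hp : ops.length ≤ p) :
    pvAOuter ops ch p = [] := by
  rw [pvAOuter, dif_neg (by omega)]

theorem pvAOuter_skip (ops : List PvOp) (ch : List Nat)
    (hch : ∀ k, ch.contains k = pvChg ops k) (q p : Nat) (hpq : p ≤ q)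
    (hgap : ∀ j, p ≤ j → j < q → pvChg ops j = false) :
    pvAOuter ops ch p = pvAOuter ops ch q := by
  by_cases heq : p = q
  · rw [heq]
  · by_cases hn : p < ops.length
    · have hcont : ch.contains p = false := by rw [hch]; exact hgap p le_rfl (by omega)
      rw [pvAOuter, dif_pos hn, if_pos hcont]
      exact pvAOuter_skip ops ch hch q (p + 1) (by omega) (fun j h1 h2 => hgap j (by omega) h2)
    · rw [pvAOuter_nil ops ch p (by omega), pvAOuter_nil ops ch q (by omega)]
termination_by q - p
decreasing_by omega

theorem pvAOuter_empty (ops : List PvOp) (ch : List Nat)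
    (hch : ∀ k, ch.contains k = pvChg ops k) (p : Nat)
    (h : ∀ j, p ≤ j → pvChg ops j = false) : pvAOuter ops ch p = [] := by
  by_cases hn : p < ops.length
  · have hcont : ch.contains p = false := by rw [hch]; exact h p le_rfl
    rw [pvAOuter, dif_pos hn, if_pos hcont]
    exact pvAOuter_empty ops ch hch (p + 1) (fun j hj => h j (by omega))
  · rw [pvAOuter_nil ops ch p (by omega)]
termination_by ops.length - p
decreasing_by omega

theorem pvRunsOK_mono (ops : List PvOp) (R : List (Nat × Nat)) (lo lo' : Nat)
    (hOK : pvRunsOK ops R lo) (hle : lo' ≤ lo)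
    (hgap : ∀ j, lo' ≤ j → j < lo → pvChg ops j = false) : pvRunsOK ops R lo' := by
  cases R with
  | nil =>
    intro j hj
    by_cases h : lo ≤ j
    · exact hOK j h
    · exact hgap j hj (by omega)
  | cons r rest =>
    obtain ⟨s, e⟩ := r
    obtain ⟨h1, h2, h3, h4, h5, h6⟩ := hOK
    refine ⟨by omega, h2, ?_, h4, h5, h6⟩
    intro j hj hjs
    by_cases h : lo ≤ j
    · exact h3 j h hjs
    · exact hgap j hj (by omega)

theorem pvRunsAux_ok (ops : List PvOp) : ∀ (cs : List Nat) (rs re : Nat),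
    cs.Pairwise (· < ·) → (∀ k ∈ cs, re + 1 ≤ k) →
    (∀ j, re + 1 ≤ j → (pvChg ops j = true ↔ j ∈ cs)) → rs ≤ re →
    (∀ j, rs ≤ j → j ≤ re → pvChg ops j = true) →
    pvRunsOK ops (pvRunsAux cs rs re) rs := by
  intro cs
  induction cs with
  | nil =>
    intro rs re _ _ henum hrs hrun
    refine ⟨le_rfl, hrs, by omega, hrun, ?_, ?_⟩
    · have := henum (re + 1) le_rfl
      simp at this
      exact this
    · intro j hj
      have := henum j (by omega)
      simp at this
      exact this
  | cons i cs ih =>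
    intro rs re hpw hge henum hrs hrun
    have hcsgt : ∀ k ∈ cs, i < k := fun k hk => List.rel_of_pairwise_cons hpw hk
    have hi : re + 1 ≤ i := hge i (by simp)
    have hchgi : pvChg ops i = true := (henum i hi).mpr (by simp)
    have henum' : ∀ j, i + 1 ≤ j → (pvChg ops j = true ↔ j ∈ cs) := by
      intro j hj
      rw [henum j (by omega)]
      constructor
      · intro h
        rcases List.mem_cons.mp h with h | h
        · omega
        · exact h
      · intro h; exact List.mem_cons_of_mem _ h
    simp only [pvRunsAux]
    split
    · rename_i hieq
      apply ih rs i hpw.of_cons (fun k hk => by have := hcsgt k hk; omega) henum' (by omega)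
      intro j h1 h2
      by_cases hj : j ≤ re
      · exact hrun j h1 hj
      · have hji : j = i := by omega
        subst hji; exact hchgi
    · rename_i hine
      have hilt : re + 2 ≤ i := by omega
      refine ⟨le_rfl, hrs, by omega, hrun, ?_, ?_⟩
      · have h := henum (re + 1) le_rfl
        by_contra hc
        have := h.mp (by revert hc; cases pvChg ops (re + 1) <;> simp)
        rcases List.mem_cons.mp this with h' | h'
        · omega
        · have := hcsgt _ h'; omega
      · apply pvRunsOK_mono ops _ i (re + 2) ?_ hilt
        · intro j h1 h2
          have h := henum j (by omega)
          by_contra hc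
          have := h.mp (by revert hc; cases pvChg ops j <;> simp)
          rcases List.mem_cons.mp this with h' | h'
          · omega
          · have := hcsgt _ h'; omega
        · exact ih i i hpw.of_cons (fun k hk => by have := hcsgt k hk; omega) henum' le_rfl
            (fun j h1 h2 => le_antisymm h1 h2 ▸ hchgi)

theorem pvRunsAux_ne_nil : ∀ (cs : List Nat) (rs re : Nat), pvRunsAux cs rs re ≠ [] := by
  intro cs
  induction cs with
  | nil => intro rs re; simp [pvRunsAux]
  | cons i cs ih =>
    intro rs re
    simp only [pvRunsAux]
    split
    · exact ih rs i
    · simp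

theorem foldl_pvRunsStep (cs : List Nat) : ∀ (acc : List (Nat × Nat)) (rs re : Nat),
    (cs.foldl pvRunsStep (acc, rs, re)).1 ++
      [((cs.foldl pvRunsStep (acc, rs, re)).2.1, (cs.foldl pvRunsStep (acc, rs, re)).2.2)] =
    acc ++ pvRunsAux cs rs re := by
  induction cs with
  | nil => intro acc rs re; simp [pvRunsAux]
  | cons i cs ih =>
    intro acc rs re
    simp only [List.foldl_cons, pvRunsStep, pvRunsAux]
    split
    · rw [ih]
    · rw [ih]; simp

theorem foldl_pvMergeStep (ops : List PvOp) (R : List (Nat × Nat)) :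
    ∀ (tl : List (Nat × Nat)) (ps pe : Nat),
    (R.foldl (pvMergeStep ops) ((ps, pe) :: tl)).reverse =
      tl.reverse ++ pvMergeAux ops R ps pe := by
  induction R with
  | nil => intro tl ps pe; simp [pvMergeAux]
  | cons r rest ih =>
    intro tl ps pe
    simp only [List.foldl_cons, pvMergeStep, pvMergeAux]
    split
    · rw [ih]
    · rw [ih]; simp

theorem alt_eq_groupsOf (ops : List PvOp) (c0 : Nat) (cs : List Nat)
    (hC : pvChangedIdxs ops 0 = c0 :: cs) :
    group_into_hunks_py_alt ops = pvGroupsOf ops (pvRunsAux cs c0 c0) := by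
  unfold group_into_hunks_py_alt
  rw [hC]
  simp only
  have hfold := foldl_pvRunsStep cs [] c0 c0
  rw [List.nil_append] at hfold
  rw [hfold]
  cases hR : pvRunsAux cs c0 c0 with
  | nil => exact absurd hR (pvRunsAux_ne_nil cs c0 c0)
  | cons r0 rest =>
    obtain ⟨s0, e0⟩ := r0
    simp only
    rw [foldl_pvMergeStep ops rest [] s0 e0]
    simp only [List.reverse_nil, List.nil_append, pvGroupsOf]
    rfl

-- `pyGetD` at an in-range Nat index is plain indexing
theorem pvMemOf {ch : List Nat} {k : Nat} (h : ch.contains k = true) : k ∈ ch := by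
  simpa using h

theorem pvNotMemOf {ch : List Nat} {k : Nat} (h : ch.contains k = false) : k ∉ ch := by
  simpa using h

theorem pvGetD_eq (ops : List PvOp) (j : Nat) (hj : j < ops.length) :
    PySem.List.pyGetD ops (j : Int) pvD = ops[j] := by
  rw [PySem.List.pyGetD_natCast]
  exact List.getD_eq_getElem ops pvD hj

mutual
theorem pvMainA (ops : List PvOp) (ch : List Nat)
    (hch : ∀ k, ch.contains k = pvChg ops k)
    (R : List (Nat × Nat)) (p : Nat) (hOK : pvRunsOK ops R p)
    (hprev : 0 < p → pvChg ops (p - 1) = false) :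
    pvAOuter ops ch p = pvGroupsOf ops R := by
  cases R with
  | nil =>
    simp only [pvGroupsOf]
    exact pvAOuter_empty ops ch hch p hOK
  | cons r rest =>
    obtain ⟨s, e⟩ := r
    obtain ⟨h1, h2, h3, h4, h5, h6⟩ := hOK
    have hchgs : pvChg ops s = true := h4 s le_rfl h2
    have hsn : s < ops.length := pvChg_lt ops s hchgs
    have hconts : ch.contains s = true := (hch s).trans hchgs
    rw [pvAOuter_skip ops ch hch s p h1 h3, pvAOuter, dif_pos hsn,
      if_neg (by simp; exact pvMemOf hconts)]
    dsimp only
    have hprev' : 0 < s → pvChg ops (s - 1) = false := by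
      intro hs0
      by_cases hsp : p = s
      · exact hsp ▸ hprev (by omega)
      · exact h3 (s - 1) (by omega) (by omega)
    have hstart : ((if 0 < s ∧ (PySem.List.pyGetD ops ((s : Int) - 1) pvD).1 = "equal"
        then s - 1 else s : Nat) : Int) = max ((s : Int) - 1) 0 := by
      by_cases hs0 : 0 < s
      · have hc : (s : Int) - 1 = ((s - 1 : Nat) : Int) := by omega
        have htag : (PySem.List.pyGetD ops ((s : Int) - 1) pvD).1 = "equal" := by
          rw [hc, pvGetD_eq ops (s - 1) (by omega)]
          exact pvChg_tag ops (s - 1) (by omega) (hprev' hs0)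
        rw [if_pos ⟨hs0, htag⟩]
        omega
      · rw [if_neg (fun hc => hs0 hc.1)]
        omega
    have hjump := pvAInner_jump ops ch hch (e + 1) (s + 1) (by omega)
      (fun j hj1 hj2 => h4 j (by omega) (by omega))
    rw [hstart, hjump]
    simp only [pvGroupsOf]
    exact pvL2 ops ch hch rest s e (max ((s : Int) - 1) 0) h6 h5 (h4 e h2 le_rfl) rfl
termination_by 2 * R.length

theorem pvL2 (ops : List PvOp) (ch : List Nat)
    (hch : ∀ k, ch.contains k = pvChg ops k)
    (R : List (Nat × Nat)) (s e : Nat) (st : Int) (hOK : pvRunsOK ops R (e + 2))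
    (hnext : pvChg ops (e + 1) = false) (hce : pvChg ops e = true)
    (hst : st = max ((s : Int) - 1) 0) :
    PySem.List.slice ops (some st) (some ((pvAInner ops ch (e + 1) : Nat) : Int)) ::
        pvAOuter ops ch (pvAInner ops ch (e + 1)) =
      (pvMergeAux ops R s e).map (pvSliceOf ops) := by
  have hen : e < ops.length := pvChg_lt ops e hce
  cases R with
  | nil =>
    have hafter : ∀ j, e + 2 ≤ j → pvChg ops j = false := hOK
    have hE : pvAInner ops ch (e + 1) = min (e + 2) ops.length := by
      by_cases h : e + 1 < ops.length
      · have hc2 : ch.contains (e + 2) = false := (hch (e + 2)).trans (hafter (e + 2) le_rfl)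
        rw [pvAInner, dif_pos h,
          if_neg (by simp; exact pvNotMemOf ((hch (e + 1)).trans hnext))]
        dsimp only
        rw [if_neg (by
          rintro ⟨-, ⟨-, hc⟩, -⟩
          have hc' : ch.contains (e + 2) = true := hc
          rw [hc2] at hc'
          simp at hc')]
        omega
      · rw [pvAInner, dif_neg h]
        omega
    rw [hE]
    have houter : pvAOuter ops ch (min (e + 2) ops.length) = [] := by
      apply pvAOuter_empty ops ch hch
      intro j hj
      by_cases hj2 : e + 2 ≤ j
      · exact hafter j hj2
      · have : j = e + 1 := by omega
        exact this ▸ hnext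
    rw [houter]
    simp only [pvMergeAux, List.map_cons, List.map_nil]
    have harg : ((min (e + 2) ops.length : Nat) : Int) = min ((e : Int) + 2) (PySem.List.len ops) := by
      rw [PySem.List.len_eq]; omega
    rw [pvSliceOf, hst, harg]
  | cons r rest =>
    obtain ⟨s', e'⟩ := r
    obtain ⟨g1, g2, g3, g4, g5, g6⟩ := hOK
    have hs'n : s' < ops.length := pvChg_lt ops s' (g4 s' le_rfl g2)
    have he1n : e + 1 < ops.length := by omega
    have hcont1 : ¬(ch.contains (e + 1) = true) := by
      simp; exact pvNotMemOf ((hch (e + 1)).trans hnext)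
    have htag : (PySem.List.pyGetD ops ((e + 1 : Nat) : Int) pvD).1 = "equal" := by
      rw [pvGetD_eq ops (e + 1) he1n]
      exact pvChg_tag ops (e + 1) he1n hnext
    by_cases hbr : s' = e + 2 ∧ pvEqLenAt ops (e + 1) ≤ pvCONTEXT_LINES * 2
    · have hc2 : ch.contains (e + 2) = true := by
        rw [hch]; exact hbr.1 ▸ g4 s' le_rfl g2
      have hstep : pvAInner ops ch (e + 1) = pvAInner ops ch (e + 2) := by
        rw [pvAInner, dif_pos he1n, if_neg hcont1]
        dsimp only
        rw [if_pos ⟨htag, ⟨by omega, hc2⟩, hbr.2⟩]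
      have hjump := pvAInner_jump ops ch hch (e' + 1) (e + 2) (by omega)
        (fun j hj1 hj2 => g4 j (by omega) (by omega))
      rw [hstep, hjump]
      simp only [pvMergeAux]
      rw [if_pos hbr]
      exact pvL2 ops ch hch rest s e' st g6 g5 (g4 e' g2 le_rfl) hst
    · have hcondF : ¬((PySem.List.pyGetD ops ((e + 1 : Nat) : Int) pvD).1 = "equal" ∧
          (e + 1 + 1 < ops.length ∧ ch.contains (e + 1 + 1) = true) ∧
          (PySem.List.pyGetD ops ((e + 1 : Nat) : Int) pvD).2.2.1 -
            (PySem.List.pyGetD ops ((e + 1 : Nat) : Int) pvD).2.1 ≤ pvCONTEXT_LINES * 2) := by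
        rintro ⟨-, ⟨-, hc⟩, hlen⟩
        have hchg2 : pvChg ops (e + 2) = true := (hch (e + 2)).symm.trans hc
        have hs'eq : s' = e + 2 := by
          by_contra hne
          have := g3 (e + 2) le_rfl (by omega)
          rw [this] at hchg2; exact absurd hchg2 (by simp)
        exact hbr ⟨hs'eq, hlen⟩
      have hstep : pvAInner ops ch (e + 1) = e + 2 := by
        rw [pvAInner, dif_pos he1n, if_neg hcont1]
        dsimp only
        rw [if_neg hcondF]
      rw [hstep]
      simp only [pvMergeAux]
      rw [if_neg (by simpa [pvEqLenAt] using hbr), List.map_cons]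
      congr 1
      · have harg : ((e + 2 : Nat) : Int) = min ((e : Int) + 2) (PySem.List.len ops) := by
          rw [PySem.List.len_eq]; omega
        rw [pvSliceOf, hst, harg]
      · exact pvMainA ops ch hch ((s', e') :: rest) (e + 2) ⟨g1, g2, g3, g4, g5, g6⟩
          (fun _ => hnext)
termination_by 2 * R.length + 1
end
-- ===== VERDICT (by name: the statement is the Claim_ definition above) =====
theorem group_into_hunks_py_spec : Claim_equal_group_into_hunks_py := by
  intro ops _
  unfold Spec_group_into_hunks_py
  cases hC : pvChangedIdxs ops 0 with
  | nil =>
    unfold group_into_hunks_py group_into_hunks_py_alt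
    rw [hC]
    rfl
  | cons c0 cs =>
    have hpw := pairwise_pvChangedIdxs ops 0
    rw [hC] at hpw
    have hnd : (c0 :: cs).Nodup := hpw.imp (fun h => Nat.ne_of_lt h)
    have hofl : PySem.Set.ofList (c0 :: cs) = c0 :: cs := PySem.Set.ofList_eq_self_of_nodup _ hnd
    have hmemiff : ∀ j, pvChg ops j = true ↔ j ∈ c0 :: cs := by
      intro j
      rw [← hC, mem_pvChangedIdxs ops 0 j]
      simp
    have hch : ∀ k, (c0 :: cs).contains k = pvChg ops k := by
      intro k
      by_cases hk : k ∈ c0 :: cs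
      · rw [(hmemiff k).mpr hk]
        simpa using hk
      · have h2 : pvChg ops k = false := by
          cases hcase : pvChg ops k
          · rfl
          · exact absurd ((hmemiff k).mp hcase) hk
        rw [h2]
        simpa using hk
    have hcsgt : ∀ k ∈ cs, c0 < k := (List.pairwise_cons.mp hpw).1
    have hOK0 : pvRunsOK ops (pvRunsAux cs c0 c0) c0 := by
      apply pvRunsAux_ok ops cs c0 c0 hpw.of_cons
        (fun k hk => by have := hcsgt k hk; omega) ?_ le_rfl
        (fun j h1 h2 => by
          have hj : j = c0 := by omega
          exact hj ▸ (hmemiff c0).mpr (by simp))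
      intro j hj
      rw [hmemiff j]
      constructor
      · intro h
        rcases List.mem_cons.mp h with h' | h'
        · omega
        · exact h'
      · exact fun h => List.mem_cons_of_mem _ h
    have hOK : pvRunsOK ops (pvRunsAux cs c0 c0) 0 := by
      apply pvRunsOK_mono ops _ c0 0 hOK0 (Nat.zero_le _)
      intro j hj1 hj2
      cases hcase : pvChg ops j
      · rfl
      · rcases List.mem_cons.mp ((hmemiff j).mp hcase) with h' | h'
        · omega
        · have := hcsgt _ h'; omega
    unfold group_into_hunks_py
    rw [hC, hofl]
    rw [if_neg (by simp)]
    rw [pvMainA ops (c0 :: cs) hch (pvRunsAux cs c0 c0) 0 hOK (fun h => absurd h (by omega))]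
    exact (alt_eq_groupsOf ops c0 cs hC).symm
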